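-- pv_equiv track=rewrite | github.com/therealrogden/archivistdnd | src/archivist_mcp/summary_text.py | normalize_for_summary_guard
-- ===== SOURCE A (Python) =====
-- def normalize_for_summary_guard(text: str | None) -> str:
--     """Normalize summary text for equality comparison.
--
--     - Treat ``None`` as empty.
--     - Normalize newlines to ``\\n``.
--     - Strip trailing whitespace from each line.
--     - Strip leading / trailing blank lines from the whole string.
--     """
--     if text is None:
--         return ""
--     if not isinstance(text, str):
--         return ""
--     s = text.replace("\r\n", "\n").replace("\r", "\n")
--     lines = [ln.rstrip() for ln in s.split("\n")]
--     while lines and not lines[0].strip():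
--         lines.pop(0)
--     while lines and not lines[-1].strip():
--         lines.pop()
--     return "\n".join(lines)
-- ===== SOURCE B (Python) =====
-- def normalize_for_summary_guard(text):
--     if not isinstance(text, str):
--         return ""
--     s = text.replace("\r\n", "\n").replace("\r", "\n")
--     lines = [ln.rstrip() for ln in s.split("\n")]
--     return "\n".join(lines).strip("\n")
-- ===== Notes on version B (the rewrite author's own statement) =====
-- stated objective: simpler
-- what changed: Replaces A's two while/pop loops that strip leading and trailing blank lines with a single join of the lines followed by stripping boundary newline characters, valid because per-line rstrip reduces every blank line to the empty string; the None and isinstance guards collapse into one check.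
import Mathlib
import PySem

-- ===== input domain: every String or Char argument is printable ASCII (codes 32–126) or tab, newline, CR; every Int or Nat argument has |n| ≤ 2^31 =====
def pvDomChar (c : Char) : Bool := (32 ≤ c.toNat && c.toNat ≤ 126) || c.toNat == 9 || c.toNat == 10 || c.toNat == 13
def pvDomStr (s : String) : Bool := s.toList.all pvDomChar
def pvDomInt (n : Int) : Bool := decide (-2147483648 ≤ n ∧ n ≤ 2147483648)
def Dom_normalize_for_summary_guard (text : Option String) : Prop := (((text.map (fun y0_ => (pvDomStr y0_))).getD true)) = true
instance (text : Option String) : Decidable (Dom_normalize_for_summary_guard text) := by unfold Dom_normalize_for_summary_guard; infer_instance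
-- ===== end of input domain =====

-- B replaces A's two while/pop loops (stripping leading/trailing blank lines) with a single
-- join(...).strip('\n'): after per-line rstrip every blank line is "", so boundary blanks become
-- boundary newlines that strip('\n') removes.  Objective: simpler.

-- ===== PORT A =====
-- `not ln.strip()`: the line is blank
def pvBlank (l : List Char) : Bool := PySem.Chars.strip l == []

-- `while lines and not lines[0].strip(): lines.pop(0)`
def pvDropLead : List (List Char) → List (List Char)
  | [] => []
  | l :: rest => if pvBlank l then pvDropLead rest else l :: rest

-- `while lines and not lines[-1].strip(): lines.pop()` (recursion on the list, popping from the back)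
def pvDropTrail : List (List Char) → List (List Char)
  | [] => []
  | l :: rest =>
    match pvDropTrail rest with
    | [] => if pvBlank l then [] else [l]
    | r :: rs => l :: r :: rs

def normalize_for_summary_guard (text : Option String) : String :=
  match text with
  | none => ""
  | some t =>
      let s := PySem.Chars.replace (PySem.Chars.replace t.toList ['\r', '\n'] ['\n']) ['\r'] ['\n']
      let lines := (PySem.Chars.splitOn s ['\n']).map PySem.Chars.rstrip
      String.ofList (PySem.Chars.join ['\n'] (pvDropTrail (pvDropLead lines)))

-- ===== PORT B =====
def normalize_for_summary_guard_alt (text : Option String) : String :=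
  match text with
  | none => ""
  | some t =>
      let s := PySem.Chars.replace (PySem.Chars.replace t.toList ['\r', '\n'] ['\n']) ['\r'] ['\n']
      let lines := (PySem.Chars.splitOn s ['\n']).map PySem.Chars.rstrip
      String.ofList (PySem.Chars.stripChars (PySem.Chars.join ['\n'] lines) ['\n'])

-- ===== PRECONDITION & SPEC =====
def Spec_normalize_for_summary_guard (text : Option String) (out : String) : Prop := out = normalize_for_summary_guard_alt text
instance (text : Option String) (out : String) : Decidable (Spec_normalize_for_summary_guard text out) := by unfold Spec_normalize_for_summary_guard; infer_instance

-- ===== CLAIM (what is proved, stated in full; the proofs are below) =====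
def Claim_equal_normalize_for_summary_guard : Prop := ∀ (text : Option String), Dom_normalize_for_summary_guard text → Spec_normalize_for_summary_guard text (normalize_for_summary_guard text)

-- ===== LEMMAS AND PROOFS =====

theorem dropWhile_idem {α : Type} (p : α → Bool) (l : List α) :
    List.dropWhile p (List.dropWhile p l) = List.dropWhile p l := by
  induction l with
  | nil => simp
  | cons a t ih =>
      by_cases h : p a = true
      · simp [List.dropWhile_cons, h, ih]
      · simp [List.dropWhile_cons, h]

theorem rstrip_eq_nil_iff (l : List Char) :
    PySem.Chars.rstrip l = [] ↔ ∀ a ∈ l, PySem.Chars.isspace a := by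
  simp [PySem.Chars.rstrip, List.dropWhile_eq_nil_iff]

theorem strip_eq_nil_iff (l : List Char) :
    PySem.Chars.strip l = [] ↔ ∀ a ∈ l, PySem.Chars.isspace a := by
  rw [PySem.Chars.strip, rstrip_eq_nil_iff]
  constructor
  · intro h a ha
    rcases (List.takeWhile_append_dropWhile (p := PySem.Chars.isspace) (l := l)) ▸ ha with _
    have : a ∈ List.takeWhile PySem.Chars.isspace l ++ List.dropWhile PySem.Chars.isspace l := by
      rw [List.takeWhile_append_dropWhile]; exact ha
    rcases List.mem_append.mp this with h1 | h2
    · exact List.mem_takeWhile_imp h1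
    · exact h a h2
  · intro h a ha
    exact h a ((List.dropWhile_sublist _).subset ha)

theorem rstrip_idem (l : List Char) :
    PySem.Chars.rstrip (PySem.Chars.rstrip l) = PySem.Chars.rstrip l := by
  simp [PySem.Chars.rstrip, dropWhile_idem]

theorem blank_rstrip (x : List Char) :
    pvBlank (PySem.Chars.rstrip x) = (PySem.Chars.rstrip x == []) := by
  rcases h : PySem.Chars.rstrip x == [] with _ | _
  · -- rstrip x ≠ []
    have hne : PySem.Chars.rstrip x ≠ [] := by simpa using h
    have : ¬ ∀ a ∈ PySem.Chars.rstrip x, PySem.Chars.isspace a := by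
      intro hall
      exact hne (by rw [← rstrip_idem x]; exact (rstrip_eq_nil_iff _).mpr hall)
    simp [pvBlank]
    intro hnil
    exact absurd ((strip_eq_nil_iff _).mp hnil) this
  · have hnil : PySem.Chars.rstrip x = [] := by simpa using h
    unfold pvBlank
    rw [hnil]
    simp [PySem.Chars.strip, PySem.Chars.lstrip, PySem.Chars.rstrip]

theorem nmem_rstrip {c : Char} {x : List Char} (h : c ∉ x) : c ∉ PySem.Chars.rstrip x := by
  intro hc
  apply h
  have := (List.dropWhile_sublist (p := PySem.Chars.isspace) (l := x.reverse)).subset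
  simpa [PySem.Chars.rstrip] using List.mem_reverse.mp (by
    simpa [PySem.Chars.rstrip] using hc) |> this |> List.mem_reverse.mp

theorem splitOn_go_nmem (c : Char) :
    ∀ (fuel : Nat) (l cur : List Char) (acc : List (List Char)),
      l.length < fuel → (∀ x ∈ acc, c ∉ x) → c ∉ cur →
      ∀ p ∈ PySem.Chars.splitOn.go [c] fuel l cur acc, c ∉ p := by
  intro fuel
  induction fuel with
  | zero => intro l cur acc h _ _ p _; exact absurd h (Nat.not_lt_zero _)
  | succ f ih =>
      intro l cur acc hlen hacc hcur p hp
      cases l with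
      | nil =>
          simp only [PySem.Chars.splitOn.go] at hp
          rcases List.mem_cons.mp (List.mem_reverse.mp hp) with h1 | h2
          · subst h1; simpa using hcur
          · exact hacc _ h2
      | cons a rest =>
          simp only [PySem.Chars.splitOn.go] at hp
          by_cases hpre : List.isPrefixOf [c] (a :: rest) = true
          · rw [if_pos hpre] at hp
            have hacc' : ∀ x ∈ cur.reverse :: acc, c ∉ x := by
              intro x hx
              rcases List.mem_cons.mp hx with h1 | h2
              · subst h1; simpa using hcur
              · exact hacc _ h2
            have hlen' : (List.drop (List.length [c]) (a :: rest)).length < f := by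
              simp at hlen ⊢; omega
            exact ih _ _ _ hlen' hacc' (by simp) p hp
          · rw [if_neg hpre] at hp
            have hne : c ≠ a := by
              intro he; apply hpre
              subst he; simp [List.isPrefixOf]
            refine ih rest (a :: cur) acc (by simp at hlen; omega) hacc ?_ p hp
            intro hmem
            rcases List.mem_cons.mp hmem with h1 | h2
            · exact hne h1
            · exact hcur h2

theorem splitOn_nmem (s : List Char) (c : Char) :
    ∀ p ∈ PySem.Chars.splitOn s [c], c ∉ p := by
  intro p hp
  exact splitOn_go_nmem c (s.length + 1) s [] [] (Nat.lt_succ_self _) (by simp) (by simp) p hp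

-- join facts (sep = ['\n'])
theorem join_nil' (sep : List Char) : PySem.Chars.join sep [] = [] := by
  simp [PySem.Chars.join, List.intercalate]

theorem join_singleton' (sep : List Char) (a : List Char) : PySem.Chars.join sep [a] = a := by
  simp [PySem.Chars.join, List.intercalate]

theorem join_cons_cons' (sep a b : List Char) (t : List (List Char)) :
    PySem.Chars.join sep (a :: b :: t) = a ++ sep ++ PySem.Chars.join sep (b :: t) := by
  simp [PySem.Chars.join, List.intercalate, List.intersperse]

theorem join_append_singleton (sep : List Char) (xs : List (List Char)) (y : List Char) (h : xs ≠ []) :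
    PySem.Chars.join sep (xs ++ [y]) = PySem.Chars.join sep xs ++ sep ++ y := by
  induction xs with
  | nil => simp at h
  | cons a t ih =>
      cases t with
      | nil => simp [join_cons_cons', join_singleton']
      | cons b u =>
          have : PySem.Chars.join sep ((a :: b :: u) ++ [y]) =
              a ++ sep ++ PySem.Chars.join sep ((b :: u) ++ [y]) := by
            simpa using join_cons_cons' sep a b (u ++ [y])
          rw [this, ih (by simp), join_cons_cons']
          simp

theorem reverse_join (ls : List (List Char)) :
    (PySem.Chars.join ['\n'] ls).reverse = PySem.Chars.join ['\n'] (ls.reverse.map List.reverse) := by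
  induction ls with
  | nil => simp [join_nil']
  | cons a t ih =>
      cases t with
      | nil => simp [join_singleton']
      | cons b u =>
          rw [join_cons_cons', List.reverse_append]
          have h2 : (a :: b :: u).reverse.map List.reverse
              = ((b :: u).reverse.map List.reverse) ++ [a.reverse] := by simp
          rw [h2, join_append_singleton _ _ _ (by simp), ← ih]
          simp [List.reverse_append]

-- dropping leading '\n' characters from a join of '\n'-free lines = dropping leading empty lines
theorem dl_join (ls : List (List Char)) (h : ∀ l ∈ ls, ('\n' : Char) ∉ l) :
    List.dropWhile (fun a => (['\n'] : List Char).contains a) (PySem.Chars.join ['\n'] ls)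
      = PySem.Chars.join ['\n'] (ls.dropWhile (· == ([] : List Char))) := by
  induction ls with
  | nil => simp [join_nil']
  | cons a t ih =>
      have ha : ('\n' : Char) ∉ a := h a (by simp)
      have ht : ∀ l ∈ t, ('\n' : Char) ∉ l := fun l hl => h l (by simp [hl])
      cases t with
      | nil =>
          rw [join_singleton']
          cases a with
          | nil => simp [join_nil']
          | cons c cs =>
              have hc : ¬ c = '\n' := fun he => ha (by simp [he])
              simp [List.dropWhile_cons, hc, join_singleton']
      | cons b u =>
          rw [join_cons_cons']
          cases a with
          | nil =>
              simp only [List.nil_append]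
              rw [show (['\n'] : List Char) ++ PySem.Chars.join ['\n'] (b :: u)
                    = '\n' :: PySem.Chars.join ['\n'] (b :: u) by simp]
              rw [List.dropWhile_cons_of_pos (by simp)]
              simpa using ih ht
          | cons c cs =>
              have hc : ¬ c = '\n' := fun he => ha (by simp [he])
              simp [List.dropWhile_cons, hc, join_cons_cons']

theorem dropLead_eq (ls : List (List Char)) (h : ∀ l ∈ ls, pvBlank l = (l == [])) :
    pvDropLead ls = ls.dropWhile (· == ([] : List Char)) := by
  induction ls with
  | nil => rfl
  | cons a t ih =>
      have ha := h a (by simp)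
      simp only [pvDropLead, ha, List.dropWhile_cons]
      by_cases he : a = []
      · simp [he, ih (fun l hl => h l (by simp [hl]))]
      · simp [he]

theorem dropTrail_eq (ls : List (List Char)) (h : ∀ l ∈ ls, pvBlank l = (l == [])) :
    pvDropTrail ls = (ls.reverse.dropWhile (· == ([] : List Char))).reverse := by
  induction ls with
  | nil => rfl
  | cons a t ih =>
      have ha := h a (by simp)
      have ihh := ih (fun l hl => h l (by simp [hl]))
      simp only [pvDropTrail, ihh, List.reverse_cons, List.dropWhile_append]
      cases hdt : t.reverse.dropWhile (· == ([] : List Char)) with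
      | nil =>
          simp only [hdt, List.isEmpty_nil, if_true, List.reverse_nil, List.dropWhile_cons]
          by_cases he : a = []
          · subst he
            have hb : pvBlank ([] : List Char) = true := by simpa using ha
            simp [hb]
          · simp [he, ha]
      | cons d ds =>
          simp only [hdt, List.isEmpty_cons, Bool.false_eq_true, if_false, List.reverse_cons]
          cases hds : ds.reverse ++ [d] with
          | nil => simp at hds
          | cons r rs => simp [hds]

theorem rev_empty_fun :
    ((fun x : List Char => x == ([] : List Char)) ∘ List.reverse)
      = (fun l : List Char => (l == ([] : List Char))) := by
  funext l
  by_cases h : l = []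
  · simp [h]
  · simp [h, List.reverse_eq_nil_iff]

theorem main_lemma (ls : List (List Char))
    (h1 : ∀ l ∈ ls, ('\n' : Char) ∉ l)
    (h2 : ∀ l ∈ ls, pvBlank l = (l == [])) :
    PySem.Chars.stripChars (PySem.Chars.join ['\n'] ls) ['\n']
      = PySem.Chars.join ['\n'] (pvDropTrail (pvDropLead ls)) := by
  have hsubL : ∀ l ∈ ls.dropWhile (· == ([] : List Char)), l ∈ ls :=
    fun l hl => (List.dropWhile_sublist _).subset hl
  rw [dropLead_eq ls h2, dropTrail_eq _ (fun l hl => h2 l (hsubL l hl))]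
  set ms := ls.dropWhile (· == ([] : List Char)) with hms
  have h1m : ∀ l ∈ ms, ('\n' : Char) ∉ l := fun l hl => h1 l (hsubL l hl)
  show PySem.Chars.stripChars (PySem.Chars.join ['\n'] ls) ['\n'] = _
  rw [PySem.Chars.stripChars]
  rw [dl_join ls h1, ← hms]
  rw [reverse_join]
  have h1r : ∀ l ∈ ms.reverse.map List.reverse, ('\n' : Char) ∉ l := by
    intro l hl
    rcases List.mem_map.mp hl with ⟨x, hx, rfl⟩
    intro hc
    exact h1m x (List.mem_reverse.mp hx) (List.mem_reverse.mp hc)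
  rw [dl_join _ h1r]
  rw [List.dropWhile_map, rev_empty_fun]
  rw [reverse_join]
  congr 1
  simp [List.map_reverse, List.map_map, Function.comp_def]

theorem ports_eq (text : Option String) :
    normalize_for_summary_guard text = normalize_for_summary_guard_alt text := by
  cases text with
  | none => rfl
  | some t =>
      simp only [normalize_for_summary_guard, normalize_for_summary_guard_alt]
      congr 1
      set s := PySem.Chars.replace (PySem.Chars.replace t.toList ['\r', '\n'] ['\n']) ['\r'] ['\n'] with hs
      have h1 : ∀ l ∈ (PySem.Chars.splitOn s ['\n']).map PySem.Chars.rstrip, ('\n' : Char) ∉ l := by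
        intro l hl
        rcases List.mem_map.mp hl with ⟨x, hx, rfl⟩
        exact nmem_rstrip (splitOn_nmem s '\n' x hx)
      have h2 : ∀ l ∈ (PySem.Chars.splitOn s ['\n']).map PySem.Chars.rstrip, pvBlank l = (l == []) := by
        intro l hl
        rcases List.mem_map.mp hl with ⟨x, hx, rfl⟩
        exact blank_rstrip x
      exact (main_lemma _ h1 h2).symm

-- ===== VERDICT (by name: the statement is the Claim_ definition above) =====
theorem normalize_for_summary_guard_spec : Claim_equal_normalize_for_summary_guard := by
  intro text _
  unfold Spec_normalize_for_summary_guard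
  exact ports_eq text
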